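-- pv_equiv track=rewrite | github.com/chris-day/owl2vault | owl2vault/mkdocs_writer.py | _iri_to_curie
-- ===== SOURCE A (Python) =====
-- from typing import Dict, List, Optional, Set
--
-- def _iri_to_curie(iri: str, prefixes: Dict[str, str]) -> Optional[str]:
--     best_prefix = None
--     best_base = ""
--     for prefix, base in prefixes.items():
--         if iri.startswith(base) and len(base) > len(best_base):
--             best_prefix = prefix
--             best_base = base
--     if best_prefix is None:
--         return None
--     suffix = iri[len(best_base) :]
--     return f"{best_prefix}:{suffix}"
-- ===== SOURCE B (Python) =====
-- def _iri_to_curie(iri, prefixes):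
--     # Arrange bases longest-first (stable sort keeps original dict order on ties),
--     # then return the CURIE for the first non-empty base that prefixes the iri.
--     for prefix, base in sorted(prefixes.items(), key=lambda kv: len(kv[1]), reverse=True):
--         if base and iri.startswith(base):
--             return f"{prefix}:{iri[len(base):]}"
--     return None
-- ===== Notes on version B (the rewrite author's own statement) =====
-- stated objective: alternative
-- what changed: Replaces A's track-the-best-while-scanning loop with a stable sort of the prefix items by base length descending followed by returning the CURIE of the first entry whose non-empty base prefixes the iri.
import Mathlib
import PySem

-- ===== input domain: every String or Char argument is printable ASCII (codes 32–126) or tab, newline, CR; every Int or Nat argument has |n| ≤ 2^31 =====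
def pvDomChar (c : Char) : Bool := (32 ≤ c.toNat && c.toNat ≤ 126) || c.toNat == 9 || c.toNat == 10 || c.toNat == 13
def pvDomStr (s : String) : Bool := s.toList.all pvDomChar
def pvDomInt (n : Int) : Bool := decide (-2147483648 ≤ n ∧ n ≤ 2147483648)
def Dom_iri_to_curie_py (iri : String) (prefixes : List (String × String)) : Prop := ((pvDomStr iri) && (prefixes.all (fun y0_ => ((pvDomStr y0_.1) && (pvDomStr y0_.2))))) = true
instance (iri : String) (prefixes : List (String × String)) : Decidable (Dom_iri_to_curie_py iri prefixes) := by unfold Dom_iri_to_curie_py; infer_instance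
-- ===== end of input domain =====

-- B replaces A's track-the-best scan by a stable sort of the prefix items (base length
-- descending) followed by taking the first entry whose non-empty base prefixes the iri;
-- same result, a genuinely different decomposition (objective: alternative).

-- ===== PORT A =====
-- loop body of A: keep (best_prefix, best_base) when the base matches and is strictly longer
def aStep (iri : String) (st : Option String × String) (kv : String × String) :
    Option String × String :=
  if PySem.Str.startswith iri kv.2 && decide (PySem.Str.len st.2 < PySem.Str.len kv.2) then
    (some kv.1, kv.2)
  else st

-- f"{p}:{iri[len(b):]}"
def aCurie (iri p b : String) : String :=
  String.ofList (p.toList ++ ':' :: (PySem.Str.slice iri (some (PySem.Str.len b)) none).toList)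

def iri_to_curie_py (iri : String) (prefixes : List (String × String)) : Option String :=
  let st := prefixes.foldl (aStep iri) (none, "")
  match st.1 with
  | none => none
  | some p => some (aCurie iri p st.2)

-- ===== PORT B =====
-- 'if base and iri.startswith(base)'
def bMatch (iri : String) (kv : String × String) : Bool :=
  !(kv.2 == "") && PySem.Str.startswith iri kv.2

-- f"{prefix}:{iri[len(base):]}"
def bCurie (iri p b : String) : String :=
  String.ofList (p.toList ++ ':' :: (PySem.Str.slice iri (some (PySem.Str.len b)) none).toList)

-- the for-loop with its early return
def bScan (iri : String) : List (String × String) → Option String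
  | [] => none
  | kv :: t => if bMatch iri kv then some (bCurie iri kv.1 kv.2) else bScan iri t

def iri_to_curie_py_alt (iri : String) (prefixes : List (String × String)) : Option String :=
  bScan iri (PySem.List.sorted prefixes (fun kv => PySem.Str.len kv.2) true)

-- ===== PRECONDITION & SPEC =====
def Spec_iri_to_curie_py (iri : String) (prefixes : List (String × String)) (out : Option String) : Prop := out = iri_to_curie_py_alt iri prefixes
instance (iri : String) (prefixes : List (String × String)) (out : Option String) : Decidable (Spec_iri_to_curie_py iri prefixes out) := by unfold Spec_iri_to_curie_py; infer_instance

-- ===== CLAIM (what is proved, stated in full; the proofs are below) =====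
def Claim_equal_iri_to_curie_py : Prop := ∀ (iri : String) (prefixes : List (String × String)), Dom_iri_to_curie_py iri prefixes → Spec_iri_to_curie_py iri prefixes (iri_to_curie_py iri prefixes)

-- ===== LEMMAS AND PROOFS =====

-- the key both sides order by: the base's length
def pKey (kv : String × String) : Int := PySem.Str.len kv.2

-- the "first longest match" of the original item list, as a left fold
def fmStep (iri : String) (o : Option (String × String)) (kv : String × String) :
    Option (String × String) :=
  if bMatch iri kv && (match o with | none => true | some m => decide (pKey m < pKey kv)) then
    some kv
  else o

def fm (iri : String) (l : List (String × String)) : Option (String × String) :=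
  l.foldl (fmStep iri) none

theorem fm_append (iri : String) (t : List (String × String)) (x : String × String) :
    fm iri (t ++ [x]) = fmStep iri (fm iri t) x := by
  simp [fm, List.foldl_append]

theorem bScan_eq_find (iri : String) (l : List (String × String)) :
    bScan iri l = (l.find? (bMatch iri)).map (fun kv => bCurie iri kv.1 kv.2) := by
  induction l with
  | nil => simp [bScan]
  | cons kv t ih =>
      by_cases h : bMatch iri kv = true
      · simp [bScan, h, List.find?]
      · simp only [Bool.not_eq_true] at h
        simp [bScan, h, List.find?, ih]

theorem fmStep_none_eval (iri : String) (x : String × String) :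
    fmStep iri none x = if bMatch iri x = true then some x else none := by
  simp [fmStep]

theorem fmStep_some_eval (iri : String) (m x : String × String) :
    fmStep iri (some m) x =
      if (bMatch iri x && decide (pKey m < pKey x)) = true then some x else some m := by
  simp [fmStep]

theorem bMatch_iff (iri : String) (x : String × String) :
    bMatch iri x = true ↔
      (PySem.Str.startswith iri x.2 = true ∧ 0 < PySem.Str.len x.2) := by
  rw [bMatch, Bool.and_eq_true, Bool.not_eq_true', beq_eq_false_iff_ne, PySem.Str.len_eq]
  constructor
  · rintro ⟨hne, hs⟩
    refine ⟨hs, ?_⟩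
    have hnil : x.2.toList ≠ [] := fun hnil => hne (String.toList_eq_nil_iff.mp hnil)
    have := List.length_pos_iff.mpr hnil
    omega
  · rintro ⟨hs, hpos⟩
    refine ⟨fun he => ?_, hs⟩
    rw [he] at hpos
    simp at hpos

theorem fm_none (iri : String) (l : List (String × String)) (h : fm iri l = none) :
    ∀ kv ∈ l, bMatch iri kv = false := by
  induction l using List.reverseRecOn with
  | nil => simp
  | append_singleton t x ih =>
      rw [fm_append] at h
      cases hft : fm iri t with
      | none =>
          rw [hft, fmStep_none_eval] at h
          intro kv hkv
          rcases List.mem_append.mp hkv with hkv | hkv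
          · exact ih hft kv hkv
          · have hx : kv = x := by simpa using hkv
            subst hx
            by_contra hb
            simp only [Bool.not_eq_false] at hb
            rw [if_pos hb] at h
            exact absurd h (by simp)
      | some m =>
          rw [hft, fmStep_some_eval] at h
          split_ifs at h

theorem fm_max (iri : String) (l : List (String × String)) (m : String × String)
    (h : fm iri l = some m) :
    ∀ kv ∈ l, bMatch iri kv = true → pKey kv ≤ pKey m := by
  induction l using List.reverseRecOn generalizing m with
  | nil => simp [fm] at h
  | append_singleton t x ih =>
      rw [fm_append] at h
      intro kv hkv hm
      cases hft : fm iri t with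
      | none =>
          rw [hft, fmStep_none_eval] at h
          split_ifs at h with hcx
          have hmx : m = x := (Option.some.inj h).symm
          rw [hmx]
          rcases List.mem_append.mp hkv with hkv | hkv
          · exact absurd hm (by simp [fm_none iri t hft kv hkv])
          · have hk : kv = x := by simpa using hkv
            rw [hk]
      | some m' =>
          rw [hft, fmStep_some_eval] at h
          split_ifs at h with hc
          · have hmx : m = x := (Option.some.inj h).symm
            rw [hmx]
            simp only [Bool.and_eq_true, decide_eq_true_eq] at hc
            rcases List.mem_append.mp hkv with hkv | hkv
            · have := ih m' hft kv hkv hm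
              omega
            · have hk : kv = x := by simpa using hkv
              rw [hk]
          · have hmm : m' = m := Option.some.inj h
            rw [← hmm]
            rcases List.mem_append.mp hkv with hkv | hkv
            · exact ih m' hft kv hkv hm
            · have hk : kv = x := by simpa using hkv
              have hm' : bMatch iri x = true := by rw [← hk]; exact hm
              rw [hk]
              simp only [hm', Bool.true_and, decide_eq_true_eq] at hc
              omega

-- A's fold state is exactly fm
theorem foldA_eq_fm (iri : String) (l : List (String × String)) :
    l.foldl (aStep iri) (none, "") =
      (match fm iri l with | none => ((none : Option String), "") | some m => (some m.1, m.2)) := by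
  induction l using List.reverseRecOn with
  | nil => simp [fm]
  | append_singleton t x ih =>
      rw [List.foldl_append, fm_append]
      simp only [List.foldl_cons, List.foldl_nil]
      rw [ih]
      have h00 : PySem.Str.len "" = 0 := by simp [PySem.Str.len_eq]
      cases hft : fm iri t with
      | none =>
          simp only
          rw [fmStep_none_eval]
          unfold aStep
          have h0' : PySem.Str.len ((none : Option String), "").2 = 0 := h00
          by_cases h1 : (PySem.Str.startswith iri x.2 &&
              decide (PySem.Str.len ((none : Option String), "").2 < PySem.Str.len x.2)) = true
          · rw [if_pos h1]
            rw [Bool.and_eq_true, decide_eq_true_eq] at h1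
            obtain ⟨hsw, hlt⟩ := h1
            have hpos : (0 : Int) < PySem.Str.len x.2 := by omega
            rw [if_pos ((bMatch_iff iri x).mpr ⟨hsw, hpos⟩)]
          · rw [if_neg h1]
            have hb : ¬ bMatch iri x = true := by
              intro hbm
              obtain ⟨hsw, hpos⟩ := (bMatch_iff iri x).mp hbm
              apply h1
              rw [Bool.and_eq_true, decide_eq_true_eq]
              refine ⟨hsw, ?_⟩
              omega
            rw [if_neg hb]
      | some m =>
          simp only
          rw [fmStep_some_eval]
          unfold aStep
          have hk0 : (0 : Int) ≤ PySem.Str.len m.2 := by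
            rw [PySem.Str.len_eq]; positivity
          by_cases h1 : (PySem.Str.startswith iri x.2 &&
              decide (PySem.Str.len ((some m.1, m.2) : Option String × String).2 < PySem.Str.len x.2)) = true
          · rw [if_pos h1]
            rw [Bool.and_eq_true, decide_eq_true_eq] at h1
            obtain ⟨hsw, hlt⟩ := h1
            have hlt' : PySem.Str.len m.2 < PySem.Str.len x.2 := hlt
            have hb : (bMatch iri x && decide (pKey m < pKey x)) = true := by
              rw [Bool.and_eq_true, decide_eq_true_eq]
              exact ⟨(bMatch_iff iri x).mpr ⟨hsw, by omega⟩,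
                (hlt' : pKey m < pKey x)⟩
            rw [if_pos hb]
          · rw [if_neg h1]
            have hb : ¬ (bMatch iri x && decide (pKey m < pKey x)) = true := by
              intro hbb
              rw [Bool.and_eq_true, decide_eq_true_eq] at hbb
              obtain ⟨hbm, hlt⟩ := hbb
              obtain ⟨hsw, hpos⟩ := (bMatch_iff iri x).mp hbm
              apply h1
              rw [Bool.and_eq_true, decide_eq_true_eq]
              exact ⟨hsw,
                (hlt : PySem.Str.len ((some m.1, m.2) : Option String × String).2 < PySem.Str.len x.2)⟩
            rw [if_neg hb]

-- insertBy and find?: a non-matching element never changes the first match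
theorem find?_insertBy_not (p : (String × String) → Bool) (bef : (String × String) → (String × String) → Bool)
    (x : String × String) (s : List (String × String)) (hx : p x = false) :
    (PySem.List.insertBy bef x s).find? p = s.find? p := by
  induction s with
  | nil => simp [PySem.List.insertBy, hx]
  | cons y ys ih =>
      by_cases hb : bef x y = true
      · simp [PySem.List.insertBy, hb, hx]
      · simp only [Bool.not_eq_true] at hb
        by_cases hy : p y = true
        · simp [PySem.List.insertBy, hb, List.find?, hy]
        · simp only [Bool.not_eq_true] at hy
          simp [PySem.List.insertBy, hb, List.find?, hy, ih]

-- a strictly-longer match becomes the new first match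
theorem find?_insertBy_new (p : (String × String) → Bool)
    (x : String × String) (s : List (String × String)) (hx : p x = true)
    (h : ∀ y ∈ s, p y = true → pKey y < pKey x) :
    (PySem.List.insertBy (fun a b => decide (pKey b < pKey a)) x s).find? p = some x := by
  induction s with
  | nil => simp [PySem.List.insertBy, hx]
  | cons y ys ih =>
      by_cases hb : pKey y < pKey x
      · simp [PySem.List.insertBy, hb, hx]
      · have hy : p y = false := by
          by_contra hy
          simp only [Bool.not_eq_false] at hy
          exact hb (h y (by simp) hy)
        simp only [not_lt] at hb
        have : (decide (pKey y < pKey x)) = false := by simp; omega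
        simp [PySem.List.insertBy, this, hy]
        exact ih (fun y hy' => h y (by simp [hy']))

-- a no-longer match leaves the first match of a descending list unchanged
theorem find?_insertBy_keep (p : (String × String) → Bool)
    (x m : String × String) (s : List (String × String))
    (hm : s.find? p = some m)
    (hpw : s.Pairwise (fun a b => pKey b ≤ pKey a))
    (hle : pKey x ≤ pKey m) :
    (PySem.List.insertBy (fun a b => decide (pKey b < pKey a)) x s).find? p = some m := by
  induction s with
  | nil => simp [List.find?] at hm
  | cons y ys ih =>
      by_cases hy : p y = true
      · have hym : y = m := by
          rw [List.find?_cons_of_pos hy] at hm; simpa using hm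
        subst hym
        have : (decide (pKey y < pKey x)) = false := by simp; omega
        simp [PySem.List.insertBy, this, hy]
      · simp only [Bool.not_eq_true] at hy
        rw [List.find?_cons_of_neg (by simp [hy])] at hm
        have hmem : m ∈ ys := List.mem_of_find?_eq_some hm
        have hym : pKey m ≤ pKey y := (List.pairwise_cons.mp hpw).1 m hmem
        have : (decide (pKey y < pKey x)) = false := by simp; omega
        simp [PySem.List.insertBy, this, hy]
        exact ih hm (List.pairwise_cons.mp hpw).2

-- the first match of the sorted list is the first longest match of the original list
theorem find?_sorted_eq_fm (iri : String) (l : List (String × String)) :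
    (PySem.List.sorted l (fun kv => PySem.Str.len kv.2) true).find? (bMatch iri) = fm iri l := by
  induction l using List.reverseRecOn with
  | nil => simp [fm, PySem.List.sorted]
  | append_singleton t x ih =>
      have hins : PySem.List.sorted (t ++ [x]) (fun kv => PySem.Str.len kv.2) true =
          PySem.List.insertBy (fun a b => decide (pKey b < pKey a)) x
            (PySem.List.sorted t (fun kv => PySem.Str.len kv.2) true) := by
        rw [PySem.List.sorted_rev_eq_foldl_insertBy, PySem.List.sorted_rev_eq_foldl_insertBy,
          List.foldl_append]
        simp only [List.foldl_cons, List.foldl_nil]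
        rfl
      rw [hins, fm_append]
      by_cases hx : bMatch iri x = true
      · cases hft : fm iri t with
        | none =>
            have hnone : ∀ y ∈ PySem.List.sorted t (fun kv => PySem.Str.len kv.2) true,
                bMatch iri y = true → pKey y < pKey x := by
              intro y hy hmy
              exact absurd hmy (by simp [fm_none iri t hft y ((PySem.List.mem_sorted ..).mp hy)])
            rw [find?_insertBy_new (bMatch iri) x _ hx hnone, fmStep_none_eval, if_pos hx]
        | some m =>
            by_cases hp : pKey m < pKey x
            · have hlt : ∀ y ∈ PySem.List.sorted t (fun kv => PySem.Str.len kv.2) true,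
                  bMatch iri y = true → pKey y < pKey x := by
                intro y hy hmy
                have := fm_max iri t m hft y ((PySem.List.mem_sorted ..).mp hy) hmy
                omega
              rw [find?_insertBy_new (bMatch iri) x _ hx hlt, fmStep_some_eval,
                if_pos (by rw [Bool.and_eq_true, decide_eq_true_eq]; exact ⟨hx, hp⟩)]
            · have hpw : (PySem.List.sorted t (fun kv => PySem.Str.len kv.2) true).Pairwise
                  (fun a b => pKey b ≤ pKey a) := by
                have := PySem.List.sorted_pairwise_rev t (fun kv => PySem.Str.len kv.2)
                exact this
              rw [find?_insertBy_keep (bMatch iri) x m _ (ih.trans hft) hpw (by omega), fmStep_some_eval,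
                if_neg (by rw [Bool.and_eq_true, decide_eq_true_eq]; exact fun hh => hp hh.2)]
      · simp only [Bool.not_eq_true] at hx
        rw [find?_insertBy_not (bMatch iri) _ x _ hx, ih]
        cases hft : fm iri t with
        | none => rw [fmStep_none_eval, if_neg (by simp [hx])]
        | some m => rw [fmStep_some_eval, if_neg (by simp [hx])]

theorem main_eq (iri : String) (prefixes : List (String × String)) :
    iri_to_curie_py iri prefixes = iri_to_curie_py_alt iri prefixes := by
  unfold iri_to_curie_py iri_to_curie_py_alt
  rw [bScan_eq_find, find?_sorted_eq_fm, foldA_eq_fm]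
  cases fm iri prefixes with
  | none => simp
  | some m => simp [aCurie, bCurie]

-- ===== VERDICT (by name: the statement is the Claim_ definition above) =====
theorem iri_to_curie_py_spec : Claim_equal_iri_to_curie_py := by
  intro iri prefixes _
  exact main_eq iri prefixes
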